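-- pv_equiv track=rewrite | github.com/paiml/depyler | examples/hard_misc_version_compare.py | parse_minor
-- ===== SOURCE A (Python) =====
-- def parse_minor(version: str) -> int:
--     n: int = len(version)
--     i: int = 0
--     dots: int = 0
--     while i < n:
--         if version[i] == ".":
--             dots = dots + 1
--             if dots == 1:
--                 i = i + 1
--                 result: int = 0
--                 while i < n:
--                     ch: str = version[i]
--                     if ch == ".":
--                         return result
--                     result = result * 10 + ord(ch) - 48
--                     i = i + 1
--                 return result
--         i = i + 1
--     return 0
-- ===== SOURCE B (Python) =====
-- def parse_minor(version: str) -> int: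
--     # single-pass state machine: 0 = before first dot, 1 = inside minor, 2 = done
--     state = 0
--     result = 0
--     for ch in version:
--         if ch == '.':
--             if state < 2:
--                 state += 1
--         elif state == 1:
--             result = result * 10 + ord(ch) - 48
--     return result
-- ===== Notes on version B (the rewrite author's own statement) =====
-- stated objective: simpler
-- what changed: Replaces A's nested while loops (outer dot-counting scan with an inner accumulate-and-early-return loop) by one flat for-loop over the string driven by a three-state machine (before-first-dot / inside-minor / done) with no nested loop, no early return and no indexing.
import Mathlib
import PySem

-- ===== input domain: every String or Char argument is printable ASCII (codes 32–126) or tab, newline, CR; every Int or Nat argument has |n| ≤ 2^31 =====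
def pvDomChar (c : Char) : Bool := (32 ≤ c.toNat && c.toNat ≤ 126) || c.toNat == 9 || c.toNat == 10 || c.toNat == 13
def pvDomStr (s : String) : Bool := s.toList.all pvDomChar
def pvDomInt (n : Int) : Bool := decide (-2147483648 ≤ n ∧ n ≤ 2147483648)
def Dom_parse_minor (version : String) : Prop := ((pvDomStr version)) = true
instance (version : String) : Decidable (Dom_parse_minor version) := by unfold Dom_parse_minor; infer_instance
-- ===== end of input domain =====

-- B replaces A's nested scanning loops by one flat pass driven by a three-state machine (simpler decomposition, same cost).

-- ===== PORT A =====
-- inner while loop of A: accumulate result*10 + ord(ch) - 48, return at a '.'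
def pmInnerA (cs : List Char) (result : Int) : Int :=
  match cs with
  | [] => result
  | ch :: rest =>
      if ch = '.' then result
      else pmInnerA rest (result * 10 + (ch.toNat : Int) - 48)

-- outer while loop of A: count dots; on the first dot enter the inner loop
def pmOuterA (cs : List Char) (dots : Int) : Int :=
  match cs with
  | [] => 0
  | c :: rest =>
      if c = '.' then
        if dots + 1 = 1 then pmInnerA rest 0
        else pmOuterA rest (dots + 1)
      else pmOuterA rest dots

def parse_minor (version : String) : Int := pmOuterA version.toList 0

-- ===== PORT B =====
-- one fold over the characters carrying (state, result);
-- state 0 = before first dot, 1 = inside the minor component, 2 = done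
def pmStep (st : Int × Int) (ch : Char) : Int × Int :=
  if ch = '.' then (if st.1 < 2 then (st.1 + 1, st.2) else st)
  else if st.1 = 1 then (st.1, st.2 * 10 + (ch.toNat : Int) - 48)
  else st

def parse_minor_alt (version : String) : Int :=
  (version.toList.foldl pmStep (0, 0)).2

-- ===== PRECONDITION & SPEC =====
def Spec_parse_minor (version : String) (out : Int) : Prop := out = parse_minor_alt version
instance (version : String) (out : Int) : Decidable (Spec_parse_minor version out) := by unfold Spec_parse_minor; infer_instance

-- ===== CLAIM (what is proved, stated in full; the proofs are below) =====
def Claim_equal_parse_minor : Prop := ∀ (version : String), Dom_parse_minor version → Spec_parse_minor version (parse_minor version)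

-- ===== LEMMAS AND PROOFS =====

-- state 2 is absorbing: the result component never changes again
theorem foldl_step_done (cs : List Char) (r : Int) :
    (cs.foldl pmStep (2, r)).2 = r := by
  induction cs generalizing r with
  | nil => rfl
  | cons c rest ih =>
      by_cases hc : c = '.' <;> simp [List.foldl, pmStep, hc, ih]

-- in state 1 the fold computes exactly A's inner loop
theorem foldl_step_minor (cs : List Char) (r : Int) :
    (cs.foldl pmStep (1, r)).2 = pmInnerA cs r := by
  induction cs generalizing r with
  | nil => rfl
  | cons c rest ih =>
      by_cases hc : c = '.'
      · simp [List.foldl, pmStep, hc, pmInnerA, foldl_step_done]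
      · simp [List.foldl, pmStep, hc, pmInnerA, ih]

-- in state 0 the fold computes exactly A's outer loop (with dots = 0)
theorem foldl_step_start (cs : List Char) :
    (cs.foldl pmStep (0, 0)).2 = pmOuterA cs 0 := by
  induction cs with
  | nil => rfl
  | cons c rest ih =>
      by_cases hc : c = '.'
      · simp [List.foldl, pmStep, hc, pmOuterA, foldl_step_minor]
      · simp [List.foldl, pmStep, hc, pmOuterA, ih]

-- ===== VERDICT (by name: the statement is the Claim_ definition above) =====
theorem parse_minor_spec : Claim_equal_parse_minor := by
  intro version _
  unfold Spec_parse_minor parse_minor parse_minor_alt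
  exact (foldl_step_start version.toList).symm
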